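-- pv_equiv track=rewrite | github.com/lemonshushu/snu-22f-db-dbms | transformers.py | boolean_expr
-- ===== SOURCE A (Python) =====
-- def boolean_expr(args) -> bool | None:
--     boolean_terms: list[bool] = args[::2]
--     intermediate_result: bool | None = False
--     for term in boolean_terms:
--         if term is True or intermediate_result is True:
--             intermediate_result = True
--         elif term is None or intermediate_result is None:
--             intermediate_result = None
--         else:
--             intermediate_result = intermediate_result or term
--     return intermediate_result
-- ===== SOURCE B (Python) =====
-- def boolean_expr(args) -> bool | None:
--     terms = args[::2]
--     if any(t is True for t in terms):
--         return True
--     if any(t is None for t in terms):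
--         return None
--     result = False
--     for t in terms:
--         result = result or t
--     return result
-- ===== Notes on version B (the rewrite author's own statement) =====
-- stated objective: simpler
-- what changed: Replaces the single interleaved three-valued (Kleene) OR fold with three separate passes: return True if any term is True, None if any is None, otherwise a plain left or-fold over the remaining (all-False) terms.
import Mathlib
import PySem

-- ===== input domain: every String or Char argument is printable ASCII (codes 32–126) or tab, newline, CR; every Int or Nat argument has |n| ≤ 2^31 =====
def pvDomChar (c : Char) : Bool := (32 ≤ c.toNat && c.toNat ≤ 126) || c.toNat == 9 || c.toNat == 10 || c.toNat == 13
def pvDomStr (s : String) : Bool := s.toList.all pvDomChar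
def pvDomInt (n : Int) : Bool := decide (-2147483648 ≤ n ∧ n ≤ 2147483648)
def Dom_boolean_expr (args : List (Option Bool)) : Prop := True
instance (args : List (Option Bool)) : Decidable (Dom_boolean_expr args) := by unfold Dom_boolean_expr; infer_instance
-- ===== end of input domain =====

-- B replaces A's single interleaved Kleene-OR fold with three separate passes (any True / any None / plain or-fold); objective: simpler.

-- ===== PORT A =====
-- Python truthiness of `intermediate_result or term` on bool|None: result if it is True, else term
def boolean_expr (args : List (Option Bool)) : Option Bool :=
  let boolean_terms : List (Option Bool) := (PySem.List.slice? args none none 2).getD []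
  boolean_terms.foldl
    (fun intermediate_result term =>
      if term == some true || intermediate_result == some true then some true
      else if term == none || intermediate_result == none then none
      else if intermediate_result == some true then intermediate_result else term)
    (some false)

-- ===== PORT B =====
def boolean_expr_alt (args : List (Option Bool)) : Option Bool :=
  let terms : List (Option Bool) := (PySem.List.slice? args none none 2).getD []
  if terms.any (· == some true) then some true
  else if terms.any (· == none) then none
  else terms.foldl (fun result t => if result == some true then result else t) (some false)

-- ===== PRECONDITION & SPEC =====
def Spec_boolean_expr (args : List (Option Bool)) (out : Option Bool) : Prop := out = boolean_expr_alt args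
instance (args : List (Option Bool)) (out : Option Bool) : Decidable (Spec_boolean_expr args out) := by unfold Spec_boolean_expr; infer_instance

-- ===== CLAIM (what is proved, stated in full; the proofs are below) =====
def Claim_equal_boolean_expr : Prop := ∀ (args : List (Option Bool)), Dom_boolean_expr args → Spec_boolean_expr args (boolean_expr args)

-- ===== LEMMAS AND PROOFS =====

-- closed characterisation of A's Kleene fold from any accumulator
theorem kleene_foldl (ts : List (Option Bool)) (r : Option Bool) :
    ts.foldl
      (fun intermediate_result term =>
        if term == some true || intermediate_result == some true then some true
        else if term == none || intermediate_result == none then none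
        else if intermediate_result == some true then intermediate_result else term)
      r
    = if r = some true ∨ ts.any (· == some true) then some true
      else if r = none ∨ ts.any (· == none) then none
      else some false := by
  induction ts generalizing r with
  | nil => rcases r with _ | _ | _ <;> simp
  | cons t ts ih =>
    rw [List.foldl_cons, ih]
    rcases t with _ | _ | _ <;> rcases r with _ | _ | _ <;>
      simp [List.any_cons]

-- B's final fold over an all-False list returns False
theorem plain_foldl_false (ts : List (Option Bool))
    (h : ∀ t ∈ ts, t = some false) :
    ts.foldl (fun result t => if result == some true then result else t) (some false)
      = some false := by
  induction ts with
  | nil => rfl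
  | cons t ts ih =>
    have ht : t = some false := h t (List.mem_cons_self)
    subst ht
    exact ih fun x hx => h x (List.mem_cons_of_mem _ hx)

-- ===== VERDICT (by name: the statement is the Claim_ definition above) =====
theorem boolean_expr_spec : Claim_equal_boolean_expr := by
  intro args _
  unfold Spec_boolean_expr boolean_expr boolean_expr_alt
  set ts := (PySem.List.slice? args none none 2).getD [] with hts
  rw [kleene_foldl]
  by_cases h1 : ts.any (· == some true) = true
  · simp [h1]
  · by_cases h2 : ts.any (· == none) = true
    · rw [if_neg (by simp [h1]), if_pos (Or.inr h2), if_neg h1, if_pos h2]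
    · have hall : ∀ t ∈ ts, t = some false := by
        intro t ht
        rcases t with _ | _ | _
        · exact absurd (List.any_eq_true.mpr ⟨_, ht, rfl⟩) h2
        · rfl
        · exact absurd (List.any_eq_true.mpr ⟨_, ht, rfl⟩) h1
      rw [if_neg (by simpa using h1), if_neg (by simpa using h2), if_neg h1, if_neg h2,
        plain_foldl_false ts hall]
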